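-- pv_equiv track=rewrite | github.com/blizz-j/wos | wos_calc.py | calculate_max_rfc
-- ===== SOURCE A (Python) =====
-- tiers = [
--     {"cost": 20, "rfc_probs": {1: 0.65, 2: 0.25, 3: 0.10}, "refinements": 20, "min_rfc": 1, "max_rfc": 3},  # Tier 1
--     {"cost": 50, "rfc_probs": {2: 0.85, 3: 0.15}, "refinements": 20, "min_rfc": 2, "max_rfc": 3},       # Tier 2
--     {"cost": 100, "rfc_probs": {3: 0.85, 4: 0.125, 5: 0.02, 6: 0.005}, "refinements": 20, "min_rfc": 3, "max_rfc": 6},  # Tier 3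
--     {"cost": 130, "rfc_probs": {3: 0.75, 4: 0.15, 5: 0.05, 6: 0.03, 7: 0.01, 8: 0.005, 9: 0.005}, "refinements": 20, "min_rfc": 3, "max_rfc": 9},  # Tier 4
--     {"cost": 160, "rfc_probs": {3: 0.7, 4: 0.12, 5: 0.09, 6: 0.04, 7: 0.015, 8: 0.01, 9: 0.01, 10: 0.005, 11: 0.005, 12: 0.005}, "refinements": 20, "min_rfc": 3, "max_rfc": 12},  # Tier 5
-- ]
--
-- def calculate_max_rfc(refinements):
--     max_rfc = 0
--     remaining = refinements
--     for tier in tiers: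
--         if remaining >= tier["refinements"]:
--             max_rfc += tier["refinements"] * tier["max_rfc"]
--             remaining -= tier["refinements"]
--         else:
--             max_rfc += remaining * tier["max_rfc"]
--             break
--     return max_rfc
-- ===== SOURCE B (Python) =====
-- # Closed-form table lookup instead of the loop: k = number of fully consumed
-- # tiers, then prefix sums give the answer directly.
-- _MAXES = [3, 3, 6, 9, 12]
-- _PREFIX_CAP = [0, 20, 40, 60, 80]        # capacity of the first k tiers
-- _PREFIX_RFC = [0, 60, 120, 240, 420]     # full-tier RFC of the first k tiers
--
-- def calculate_max_rfc(refinements):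
--     if refinements >= 100:
--         return 660
--     k = max(0, refinements // 20)
--     return _PREFIX_RFC[k] + (refinements - _PREFIX_CAP[k]) * _MAXES[k]
-- ===== Notes on version B (the rewrite author's own statement) =====
-- stated objective: alternative
-- what changed: Replaced the accumulate-and-break loop over the tier list with a closed-form table lookup: precomputed prefix-capacity and prefix-RFC tables over the fixed tier table, the index of the partially-filled tier computed by floor division.
import Mathlib
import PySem

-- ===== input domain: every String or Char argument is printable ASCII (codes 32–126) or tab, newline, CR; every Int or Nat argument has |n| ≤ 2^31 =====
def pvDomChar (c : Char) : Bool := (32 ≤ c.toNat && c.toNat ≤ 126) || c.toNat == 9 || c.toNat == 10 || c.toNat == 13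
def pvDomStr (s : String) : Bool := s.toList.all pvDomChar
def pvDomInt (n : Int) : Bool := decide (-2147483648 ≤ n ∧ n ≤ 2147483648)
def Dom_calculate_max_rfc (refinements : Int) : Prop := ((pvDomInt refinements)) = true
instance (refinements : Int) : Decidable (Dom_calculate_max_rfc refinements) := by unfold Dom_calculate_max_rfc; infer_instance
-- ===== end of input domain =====

-- B replaces A's accumulate-and-break loop over the tiers with a closed-form
-- prefix-table lookup (objective: alternative/simpler constant-time formula).

-- ===== PORT A =====
-- The Python tiers are dicts; the function reads only the integer fields
-- "refinements" and "max_rfc", so each tier is ported as that pair of Ints.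
def tiersA : List (Int × Int) := [(20, 3), (20, 3), (20, 6), (20, 9), (20, 12)]

-- the for-loop with its break, as structural recursion over the tier list
def calcLoopA : List (Int × Int) → Int → Int → Int
  | [], max_rfc, _ => max_rfc
  | t :: rest, max_rfc, remaining =>
    if remaining ≥ t.1 then
      calcLoopA rest (max_rfc + t.1 * t.2) (remaining - t.1)
    else
      max_rfc + remaining * t.2

def calculate_max_rfc (refinements : Int) : Int :=
  calcLoopA tiersA 0 refinements

-- ===== PORT B =====
def maxesB : List Int := [3, 3, 6, 9, 12]
def prefixCapB : List Int := [0, 20, 40, 60, 80]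
def prefixRfcB : List Int := [0, 60, 120, 240, 420]

-- list indexing: the index k is always in [0,4], so pyGet? is some; getD 0 is exact here
def calculate_max_rfc_alt (refinements : Int) : Int :=
  if refinements ≥ 100 then 660
  else
    let k := max 0 (PySem.Int.floordiv refinements 20)
    (PySem.List.pyGet? prefixRfcB k).getD 0
      + (refinements - (PySem.List.pyGet? prefixCapB k).getD 0)
        * (PySem.List.pyGet? maxesB k).getD 0

-- ===== PRECONDITION & SPEC =====
def Spec_calculate_max_rfc (refinements : Int) (out : Int) : Prop := out = calculate_max_rfc_alt refinements
instance (refinements : Int) (out : Int) : Decidable (Spec_calculate_max_rfc refinements out) := by unfold Spec_calculate_max_rfc; infer_instance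

-- ===== CLAIM (what is proved, stated in full; the proofs are below) =====
def Claim_equal_calculate_max_rfc : Prop := ∀ (refinements : Int), Dom_calculate_max_rfc refinements → Spec_calculate_max_rfc refinements (calculate_max_rfc refinements)

-- ===== LEMMAS AND PROOFS =====

theorem fdiv20_eq (r k : Int) (h1 : 20 * k ≤ r) (h2 : r < 20 * (k + 1)) :
    PySem.Int.floordiv r 20 = k := by
  simp only [PySem.Int.floordiv]
  rw [Int.fdiv_eq_ediv]; simp; omega

-- ===== VERDICT (by name: the statement is the Claim_ definition above) =====
theorem calculate_max_rfc_spec : Claim_equal_calculate_max_rfc := by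
  intro r _
  unfold Spec_calculate_max_rfc calculate_max_rfc calculate_max_rfc_alt calcLoopA tiersA
  by_cases h100 : r ≥ 100
  · simp only [calcLoopA, if_pos, h100]
    split_ifs <;> omega
  · by_cases h0 : r < 0
    · have hk : PySem.Int.floordiv r 20 ≤ -1 := by
        simp only [PySem.Int.floordiv]
        rw [Int.fdiv_eq_ediv]; simp; omega
      have : max 0 (PySem.Int.floordiv r 20) = 0 := by omega
      rw [this]
      simp [calcLoopA, PySem.List.pyGet?, PySem.List.pyIdx?, prefixRfcB, prefixCapB, maxesB]
      split_ifs <;> omega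
    · -- 0 ≤ r < 100: k = r.fdiv 20 ∈ {0,1,2,3,4}
      have h : 0 ≤ r ∧ r < 100 := by omega
      rcases (by omega : (0 ≤ r ∧ r < 20) ∨ (20 ≤ r ∧ r < 40) ∨ (40 ≤ r ∧ r < 60) ∨ (60 ≤ r ∧ r < 80) ∨ (80 ≤ r ∧ r < 100)) with ⟨a,b⟩|⟨a,b⟩|⟨a,b⟩|⟨a,b⟩|⟨a,b⟩ <;>
        [ rw [fdiv20_eq r 0 (by omega) (by omega)];
          rw [fdiv20_eq r 1 (by omega) (by omega)];
          rw [fdiv20_eq r 2 (by omega) (by omega)];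
          rw [fdiv20_eq r 3 (by omega) (by omega)];
          rw [fdiv20_eq r 4 (by omega) (by omega)] ] <;>
        simp [calcLoopA, PySem.List.pyGet?, PySem.List.pyIdx?, prefixRfcB, prefixCapB, maxesB] <;>
        split_ifs <;> omega
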